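-- pv_equiv track=rewrite | github.com/MdotSouza/GitInfinity | Provas/Python/funcao.py | encontraSeculo
-- ===== SOURCE A (Python) =====
-- def encontraSeculo(ano):
--     resposta = ""
--     seculoArabico = 0
--     #ENCONTRA SÉCULO EM ALGORISMOS ARÁBICOS
--     if ano < 0:
--         resposta = "Entrada Inválida"
--     elif ano%100 == 0:
--         seculoArabico = ano//100
--     else:
--         seculoArabico = (ano//100)+1
--
--     #CONVERTE SÉCULO EM ALGORISMOS ROMANOS
--     seculoRomano = seculoArabico
--     dicRomanos= {1000:"M",900:"CM",500:"D",400:"CD",100:"C",90:"XC",50:"L",40:"XL",10:"X",9:"IX",5:"V",4:"IV",1:"I"}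
--     for numero, simbolo in dicRomanos.items():
--         while (seculoRomano/numero) >= 1:
--             resposta += simbolo
--             seculoRomano -= numero
--
--     return resposta
-- ===== SOURCE B (Python) =====
-- def encontraSeculo(ano):
--     if ano < 0:
--         return "Entrada Inv\u00e1lida"
--     sec = (ano + 99) // 100  # ceiling division: the century
--     parts = []
--     for value, symbol in ((1000, "M"), (900, "CM"), (500, "D"), (400, "CD"),
--                           (100, "C"), (90, "XC"), (50, "L"), (40, "XL"),
--                           (10, "X"), (9, "IX"), (5, "V"), (4, "IV"), (1, "I")):
--         parts.append(symbol * (sec // value))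
--         sec %= value
--     return "".join(parts)
-- ===== Notes on version B (the rewrite author's own statement) =====
-- stated objective: simpler
-- what changed: Replaces the greedy one-symbol-at-a-time subtraction while-loop with one divmod per (value,symbol) pair (symbol * (sec // value), sec %= value) joined at the end, and computes the century by a single ceiling division instead of a mod test with two branches.
import Mathlib
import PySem

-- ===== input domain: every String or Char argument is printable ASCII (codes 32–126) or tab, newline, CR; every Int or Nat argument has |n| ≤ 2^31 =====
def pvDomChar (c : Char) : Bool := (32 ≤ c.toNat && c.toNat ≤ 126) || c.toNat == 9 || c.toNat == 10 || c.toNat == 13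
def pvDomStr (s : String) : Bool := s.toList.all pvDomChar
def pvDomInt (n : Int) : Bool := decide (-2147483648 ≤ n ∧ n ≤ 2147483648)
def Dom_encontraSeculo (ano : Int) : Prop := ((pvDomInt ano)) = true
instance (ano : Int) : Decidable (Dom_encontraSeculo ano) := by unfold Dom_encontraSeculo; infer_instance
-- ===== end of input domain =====

-- B replaces A's one-symbol-at-a-time subtraction while-loop by one divmod per (value,symbol)
-- pair and computes the century with a single ceiling division: simpler, same result.

-- ===== PORT A =====
-- the inner `while (seculoRomano/numero) >= 1: resposta += simbolo; seculoRomano -= numero`.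
-- Python's float-division test `(n/numero) >= 1` equals `numero ≤ n` for 0 < numero and the
-- int magnitudes reachable here (all < 2^53, where the comparison is exact); fuel-guarded
-- recursion with fuel n.natAbs + 1, which the loop never exhausts on the reachable states.
def pvWhileA : Nat → Int → Int → String → String → String × Int
  | 0, n, _, _, acc => (acc, n)
  | fuel+1, n, numero, simbolo, acc =>
      if numero ≤ n then pvWhileA fuel (n - numero) numero simbolo (acc ++ simbolo)
      else (acc, n)

-- `for numero, simbolo in dicRomanos.items():` — the dict literal has 13 distinct keys, so
-- .items() is exactly the insertion-order pair list pvDicA.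
def pvForA : List (Int × String) → String → Int → String
  | [], resposta, _ => resposta
  | (numero, simbolo) :: rest, resposta, n =>
      let p := pvWhileA (n.natAbs + 1) n numero simbolo resposta
      pvForA rest p.1 p.2

def pvDicA : List (Int × String) :=
  [(1000,"M"),(900,"CM"),(500,"D"),(400,"CD"),(100,"C"),(90,"XC"),(50,"L"),(40,"XL"),
   (10,"X"),(9,"IX"),(5,"V"),(4,"IV"),(1,"I")]

def encontraSeculo (ano : Int) : String :=
  let resposta : String := ""
  let seculoArabico : Int := 0
  let rs : String × Int :=
    if ano < 0 then ("Entrada Inválida", seculoArabico)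
    else if PySem.Int.mod ano 100 = 0 then (resposta, PySem.Int.floordiv ano 100)
    else (resposta, PySem.Int.floordiv ano 100 + 1)
  pvForA pvDicA rs.1 rs.2

-- ===== PORT B =====
-- `symbol * (sec // value)` — Python string repetition
def pvStrMul (s : String) (q : Int) : String := (List.replicate q.toNat s).foldl (·++·) ""

def pvPairsB : List (Int × String) :=
  [(1000,"M"),(900,"CM"),(500,"D"),(400,"CD"),(100,"C"),(90,"XC"),(50,"L"),(40,"XL"),
   (10,"X"),(9,"IX"),(5,"V"),(4,"IV"),(1,"I")]

-- the parts list built by Source B's loop: parts.append(symbol * (sec // value)); sec %= value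
def pvPartsB : List (Int × String) → Int → List String
  | [], _ => []
  | (v, s) :: rest, sec =>
      pvStrMul s (PySem.Int.floordiv sec v) :: pvPartsB rest (PySem.Int.mod sec v)

def encontraSeculo_alt (ano : Int) : String :=
  if ano < 0 then "Entrada Inválida"
  else String.join (pvPartsB pvPairsB (PySem.Int.floordiv (ano + 99) 100))

-- ===== PRECONDITION & SPEC =====
def Spec_encontraSeculo (ano : Int) (out : String) : Prop := out = encontraSeculo_alt ano
instance (ano : Int) (out : String) : Decidable (Spec_encontraSeculo ano out) := by unfold Spec_encontraSeculo; infer_instance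

-- ===== CLAIM (what is proved, stated in full; the proofs are below) =====
def Claim_equal_encontraSeculo : Prop := ∀ (ano : Int), Dom_encontraSeculo ano → Spec_encontraSeculo ano (encontraSeculo ano)

-- ===== LEMMAS AND PROOFS =====

lemma foldl_append_str (l : List String) (acc : String) :
    l.foldl (·++·) acc = acc ++ l.foldl (·++·) "" := by
  induction l generalizing acc with
  | nil => simp
  | cons x xs ih =>
      simp only [List.foldl_cons]
      rw [ih (acc ++ x), ih ((""  : String) ++ x)]
      simp [String.append_assoc]

lemma join_cons (x : String) (l : List String) :
    String.join (x :: l) = x ++ String.join l := by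
  simp only [String.join, List.foldl_cons]
  rw [foldl_append_str]
  simp

lemma strMul_succ (s : String) (q : Int) (hq : 0 ≤ q) :
    pvStrMul s (q + 1) = s ++ pvStrMul s q := by
  unfold pvStrMul
  have : (q + 1).toNat = q.toNat + 1 := by omega
  rw [this, List.replicate_succ, List.foldl_cons, foldl_append_str]
  simp

lemma whileA_eq (numero : Int) (hv : 0 < numero) (s : String) :
    ∀ fuel (n : Int) (acc : String), 0 ≤ n → n.natAbs < fuel →
      pvWhileA fuel n numero s acc
        = (acc ++ pvStrMul s (PySem.Int.floordiv n numero), PySem.Int.mod n numero) := by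
  intro fuel
  induction fuel with
  | zero => intro n acc _ h; omega
  | succ fuel ih =>
      intro n acc hn hf
      rw [PySem.Int.floordiv_eq_ediv_of_pos hv, PySem.Int.mod_eq_emod_of_pos hv]
      show (if numero ≤ n then pvWhileA fuel (n - numero) numero s (acc ++ s)
            else (acc, n)) = _
      split_ifs with h
      · have hsub : (0:Int) ≤ n - numero := by omega
        have hfa : (n - numero).natAbs < fuel := by omega
        rw [ih (n - numero) (acc ++ s) hsub hfa,
            PySem.Int.floordiv_eq_ediv_of_pos hv, PySem.Int.mod_eq_emod_of_pos hv]
        have hdiv : n / numero = (n - numero) / numero + 1 := by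
          have := Int.add_mul_ediv_right (n - numero) 1 (show numero ≠ 0 by omega)
          simp at this
          omega
        have hmod : n % numero = (n - numero) % numero :=
          (Int.sub_emod_right n numero).symm
        have hq : 0 ≤ (n - numero) / numero := Int.ediv_nonneg hsub (le_of_lt hv)
        rw [hdiv, hmod, strMul_succ s _ hq, String.append_assoc]
      · have hdiv : n / numero = 0 := Int.ediv_eq_zero_of_lt hn (by omega)
        have hmod : n % numero = n := Int.emod_eq_of_lt hn (by omega)
        rw [hdiv, hmod]
        simp [pvStrMul]

lemma forA_eq : ∀ (pairs : List (Int × String)), (∀ p ∈ pairs, 0 < p.1) →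
    ∀ (n : Int) (acc : String), 0 ≤ n →
      pvForA pairs acc n = acc ++ String.join (pvPartsB pairs n) := by
  intro pairs
  induction pairs with
  | nil => intro _ n acc _; simp [pvForA, pvPartsB, String.join]
  | cons p rest ih =>
      intro hpos n acc hn
      obtain ⟨v, s⟩ := p
      have hv : 0 < v := hpos (v, s) (List.mem_cons_self ..)
      show pvForA rest (pvWhileA (n.natAbs + 1) n v s acc).1 (pvWhileA (n.natAbs + 1) n v s acc).2
            = acc ++ String.join (pvPartsB ((v, s) :: rest) n)
      rw [whileA_eq v hv s (n.natAbs + 1) n acc hn (by omega)]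
      have hmn : 0 ≤ PySem.Int.mod n v := by
        rw [PySem.Int.mod_eq_emod_of_pos hv]
        exact Int.emod_nonneg n (by omega)
      rw [ih (fun q hq => hpos q (List.mem_cons_of_mem _ hq)) (PySem.Int.mod n v) _ hmn]
      show acc ++ pvStrMul s (PySem.Int.floordiv n v) ++ _ = _
      rw [pvPartsB, join_cons, String.append_assoc]

lemma dic_pos : ∀ p ∈ pvDicA, 0 < p.1 := by decide

-- ===== VERDICT (by name: the statement is the Claim_ definition above) =====
theorem encontraSeculo_spec : Claim_equal_encontraSeculo := by
  intro ano _
  unfold Spec_encontraSeculo encontraSeculo encontraSeculo_alt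
  by_cases hneg : ano < 0
  · simp only [if_pos hneg]
    decide
  · simp only [if_neg hneg]
    have hpos100 : (0:Int) < 100 := by norm_num
    have hsn : (0:Int) ≤ PySem.Int.floordiv (ano + 99) 100 := by
      rw [PySem.Int.floordiv_eq_ediv_of_pos hpos100]
      exact Int.ediv_nonneg (by omega) (by norm_num)
    split_ifs with h
    · rw [PySem.Int.mod_eq_emod_of_pos hpos100] at h
      have e : PySem.Int.floordiv ano 100 = PySem.Int.floordiv (ano + 99) 100 := by
        rw [PySem.Int.floordiv_eq_ediv_of_pos hpos100,
            PySem.Int.floordiv_eq_ediv_of_pos hpos100]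
        omega
      show pvForA pvDicA "" (PySem.Int.floordiv ano 100) = _
      rw [e, forA_eq pvDicA dic_pos _ "" hsn]
      simp [show pvDicA = pvPairsB from rfl]
    · rw [PySem.Int.mod_eq_emod_of_pos hpos100] at h
      have e : PySem.Int.floordiv ano 100 + 1 = PySem.Int.floordiv (ano + 99) 100 := by
        rw [PySem.Int.floordiv_eq_ediv_of_pos hpos100,
            PySem.Int.floordiv_eq_ediv_of_pos hpos100]
        omega
      show pvForA pvDicA "" (PySem.Int.floordiv ano 100 + 1) = _
      rw [e, forA_eq pvDicA dic_pos _ "" hsn]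
      simp [show pvDicA = pvPairsB from rfl]
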